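-- pv_equiv track=rewrite | github.com/asweigart/programmedpatterns | book/visualpatterns.py | formula61
-- ===== SOURCE A (Python) =====
-- def formula61(step):
--     size = 1
--     for i in range(2, step + 1):
--         if i % 2 == 0:
--             size += 2
--         else:
--             size -= 1
--     return size * size
-- ===== SOURCE B (Python) =====
-- def formula61(step):
--     if step < 2:
--         return 1
--     size = 1 + 2 * (step // 2) - (step - 1) // 2
--     return size * size
-- ===== Notes on version B (the rewrite author's own statement) =====
-- stated objective: faster
-- what changed: Replaced the O(step) even/odd accumulation loop with a closed-form count of evens and odds in the range.
import Mathlib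
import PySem

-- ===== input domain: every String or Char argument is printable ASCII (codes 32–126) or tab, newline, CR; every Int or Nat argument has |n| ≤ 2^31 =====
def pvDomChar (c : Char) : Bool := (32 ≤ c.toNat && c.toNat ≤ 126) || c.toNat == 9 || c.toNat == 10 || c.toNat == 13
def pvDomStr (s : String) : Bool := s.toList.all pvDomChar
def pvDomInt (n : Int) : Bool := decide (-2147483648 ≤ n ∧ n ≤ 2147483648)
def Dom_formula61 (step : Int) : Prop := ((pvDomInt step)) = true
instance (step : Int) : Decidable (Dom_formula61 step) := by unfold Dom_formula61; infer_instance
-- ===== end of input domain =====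

-- B replaces A's O(step) even/odd accumulation loop by a closed-form count of evens and odds (faster: asymptotic, measured).


-- ===== PORT A =====
def formula61 (step : Int) : Int :=
  let size :=
    (PySem.List.pyRange 2 (step + 1) 1).foldl
      (fun size i => if PySem.Int.mod i 2 = 0 then size + 2 else size - 1) 1
  size * size

-- ===== PORT B =====
def formula61_alt (step : Int) : Int :=
  if step < 2 then 1
  else
    let size := 1 + 2 * PySem.Int.floordiv step 2 - PySem.Int.floordiv (step - 1) 2
    size * size

-- ===== PRECONDITION & SPEC =====
def Spec_formula61 (step : Int) (out : Int) : Prop := out = formula61_alt step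
instance (step : Int) (out : Int) : Decidable (Spec_formula61 step out) := by unfold Spec_formula61; infer_instance

-- ===== CLAIM (what is proved, stated in full; the proofs are below) =====
def Claim_equal_formula61 : Prop := ∀ (step : Int), Dom_formula61 step → Spec_formula61 step (formula61 step)

-- ===== LEMMAS AND PROOFS =====

-- loop invariant: the accumulated size over range(2, s+1) equals the closed form, for s ≥ 1
theorem formula61_loop (n : Nat) :
    (PySem.List.pyRange 2 ((1 + (n : Int)) + 1) 1).foldl
      (fun size i => if PySem.Int.mod i 2 = 0 then size + 2 else size - 1) 1
      = 1 + 2 * PySem.Int.floordiv (1 + (n : Int)) 2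
          - PySem.Int.floordiv ((1 + (n : Int)) - 1) 2 := by
  induction n with
  | zero =>
    rw [PySem.List.pyRange_one_eq_nil (by norm_num)]
    simp [PySem.Int.floordiv]
  | succ m ih =>
    have h : (1 + ((m : Int) + 1)) + 1 = ((1 + (m : Int)) + 1) + 1 := by ring
    push_cast
    rw [h, PySem.List.pyRange_one_succ_right (by omega), List.foldl_append]
    have ihm := ih
    push_cast at ihm
    rw [ihm]
    have e1 : PySem.Int.floordiv (1 + (m : Int)) 2 = (1 + (m : Int)) / 2 :=
      PySem.Int.floordiv_eq_ediv_of_pos (by omega)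
    have e2 : PySem.Int.floordiv (1 + (m : Int) - 1) 2 = (1 + (m : Int) - 1) / 2 :=
      PySem.Int.floordiv_eq_ediv_of_pos (by omega)
    have e3 : PySem.Int.floordiv (1 + (m : Int) + 1) 2 = (1 + (m : Int) + 1) / 2 :=
      PySem.Int.floordiv_eq_ediv_of_pos (by omega)
    have e4 : PySem.Int.mod (1 + (m : Int) + 1) 2 = (1 + (m : Int) + 1) % 2 :=
      PySem.Int.mod_eq_emod_of_pos (by omega)
    have e5 : PySem.Int.floordiv (1 + (m : Int) + 1 - 1) 2 = (1 + (m : Int) + 1 - 1) / 2 :=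
      PySem.Int.floordiv_eq_ediv_of_pos (by omega)
    have h2 : (1 : Int) + ((m : Int) + 1) = 1 + (m : Int) + 1 := by ring
    simp only [List.foldl_cons, List.foldl_nil, e4, h2, e3, e5, e1, e2]
    split_ifs with hpar <;> omega

-- ===== VERDICT (by name: the statement is the Claim_ definition above) =====
theorem formula61_spec : Claim_equal_formula61 := by
  intro step _
  unfold Spec_formula61 formula61 formula61_alt
  by_cases h : step < 2
  · rw [PySem.List.pyRange_one_eq_nil (by omega)]
    simp [h]
  · simp only [if_neg h]
    obtain ⟨n, hn⟩ : ∃ n : Nat, step = 1 + (n : Int) :=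
      ⟨(step - 1).toNat, by omega⟩
    subst hn
    simp only [formula61_loop n]
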